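-- pv_equiv track=rewrite | github.com/somm12/codingTest | 19주차_lv2/17683.py | solution
-- ===== SOURCE A (Python) =====
-- def solution(m, musicinfos):
--     answer = []
--     high = ['C#','D#','F#','G#','A#']
--     for i in high:
--         m = m.replace(i,i[0].lower())
--
--     for music in musicinfos:
--         s,e,title,k = music.split(",")
--         for i in high:
--             k = k.replace(i,i[0].lower())
--         s = list(map(int,s.split(":")))
--         e = list(map(int,e.split(":")))
--         time = (e[0] - s[0])*60 + (e[1]-s[1])
--         total = ((time//len(k)) * k) + k[:time%len(k)]
--
--         if m in total:
--             answer.append((title,time))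
--     if len(answer) == 0:
--         return '(None)'
--     answer.sort(key = lambda x:-x[1])
--     return answer[0][0]
-- ===== SOURCE B (Python) =====
-- def _normalize(s):
--     for sharp in ('C#', 'D#', 'F#', 'G#', 'A#'):
--         s = s.replace(sharp, sharp[0].lower())
--     return s
--
--
-- def _matched(m, music):
--     """Return (title, time) when the normalized melody m plays inside this song, else None."""
--     s, e, title, k = music.split(",")
--     k = _normalize(k)
--     sp = list(map(int, s.split(":")))
--     ep = list(map(int, e.split(":")))
--     time = (ep[0] * 60 + ep[1]) - (sp[0] * 60 + sp[1])
--     q, r = divmod(time, len(k))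
--     total = q * k + k[:r]
--     return (title, time) if total.find(m) != -1 else None
--
--
-- def solution(m, musicinfos):
--     m = _normalize(m)
--     best = None
--     for music in musicinfos:
--         r = _matched(m, music)
--         if r is not None and (best is None or r[1] > best[1]):
--             best = r
--     return best[0] if best is not None else '(None)'
-- ===== Notes on version B (the rewrite author's own statement) =====
-- stated objective: alternative
-- what changed: B replaces A's collect-all-matches-then-stable-sort selection with a single-pass running maximum (strict >, so the first-seen song still wins ties), decomposed into a per-song helper that computes the duration via minutes-since-midnight, builds the expansion with divmod, and tests containment with str.find instead of 'in'.
import Mathlib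
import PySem

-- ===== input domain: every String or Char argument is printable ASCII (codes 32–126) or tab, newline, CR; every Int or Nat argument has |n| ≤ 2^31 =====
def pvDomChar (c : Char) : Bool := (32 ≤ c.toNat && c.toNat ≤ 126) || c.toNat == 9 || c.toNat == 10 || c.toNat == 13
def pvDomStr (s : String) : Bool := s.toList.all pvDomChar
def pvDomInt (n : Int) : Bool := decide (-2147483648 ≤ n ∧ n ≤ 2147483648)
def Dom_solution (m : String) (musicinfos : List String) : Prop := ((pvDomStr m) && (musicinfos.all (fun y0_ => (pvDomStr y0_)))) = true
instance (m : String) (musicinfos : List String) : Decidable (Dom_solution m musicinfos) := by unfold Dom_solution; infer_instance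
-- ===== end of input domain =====

-- B replaces A's collect-matches-then-stable-sort selection by a single-pass running maximum
-- (strict >, keeping the first-seen tie-break) over a per-song helper; same cost, no match list.

-- ===== PORT A =====
-- high = ['C#','D#','F#','G#','A#']  (as char lists; both Pythons contain this literal)
def pvHigh : List (List Char) := [['C','#'], ['D','#'], ['F','#'], ['G','#'], ['A','#']]

-- the loop  "for i in high: x = x.replace(i, i[0].lower())"  (identical in Source A and Source B's _normalize);
-- i[0] as a 1-char string is i.take 1 (every element of the literal pvHigh has 2 chars)
def pvNorm (x : List Char) : List Char :=
  pvHigh.foldl (fun acc i => PySem.Chars.replace acc i (PySem.Chars.lower (i.take 1))) x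

-- body of A's "for music in musicinfos" loop, accumulating the answer list
def pvStepA (m : List Char) (answer : List (String × Int)) (music : String) : List (String × Int) :=
  match PySem.Chars.splitOn music.toList [','] with
  | [s, e, title, k] =>
    let k := pvNorm k
    -- s = list(map(int,s.split(":")));  int() ValueError is outside Pre_ (getD 0 unreachable there)
    let sp := (PySem.Chars.splitOn s [':']).map (fun p => (PySem.Int.ofChars? p).getD 0)
    let ep := (PySem.Chars.splitOn e [':']).map (fun p => (PySem.Int.ofChars? p).getD 0)
    -- s[0] etc.: IndexError outside Pre_
    let time := (PySem.List.pyGetD ep 0 0 - PySem.List.pyGetD sp 0 0) * 60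
                + (PySem.List.pyGetD ep 1 0 - PySem.List.pyGetD sp 1 0)
    -- total = ((time//len(k)) * k) + k[:time%len(k)]  (len(k) = 0 → ZeroDivisionError, outside Pre_)
    let total := PySem.List.pyRepeat k (PySem.Int.floordiv time (k.length : Int))
                 ++ PySem.List.slice k none (some (PySem.Int.mod time (k.length : Int)))
    if PySem.Chars.isIn m total then answer ++ [(String.ofList title, time)] else answer
  | _ => answer   -- unpack of ≠ 4 fields raises ValueError: outside Pre_

def solution (m : String) (musicinfos : List String) : String :=
  let m := pvNorm m.toList
  let answer := musicinfos.foldl (pvStepA m) []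
  if answer.length = 0 then "(None)"
  else (PySem.List.pyGetD (PySem.List.sorted answer (fun x => -x.2) false) 0 ("", 0)).1

-- ===== PORT B =====
-- Source B's _matched(m, music): Some (title, time) when the song matches, else none
def pvMatched (m : List Char) (music : String) : Option (String × Int) :=
  match PySem.Chars.splitOn music.toList [','] with
  | [s, e, title, k] =>
    let k := pvNorm k
    let sp := (PySem.Chars.splitOn s [':']).map (fun p => (PySem.Int.ofChars? p).getD 0)
    let ep := (PySem.Chars.splitOn e [':']).map (fun p => (PySem.Int.ofChars? p).getD 0)
    let time := (PySem.List.pyGetD ep 0 0 * 60 + PySem.List.pyGetD ep 1 0)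
                - (PySem.List.pyGetD sp 0 0 * 60 + PySem.List.pyGetD sp 1 0)
    -- q, r = divmod(time, len(k)); ZeroDivisionError outside Pre_ (getD unreachable there)
    let qr := (PySem.Int.divmod? time (k.length : Int)).getD (0, 0)
    let total := PySem.List.pyRepeat k qr.1 ++ PySem.List.slice k none (some qr.2)
    if PySem.Chars.find total m ≠ -1 then some (String.ofList title, time) else none
  | _ => none   -- unpack of ≠ 4 fields raises ValueError: outside Pre_

def solution_alt (m : String) (musicinfos : List String) : String :=
  let m := pvNorm m.toList
  let best := musicinfos.foldl
    (fun best music =>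
      match pvMatched m music with
      | some r => match best with
                  | none => some r
                  | some b => if r.2 > b.2 then some r else some b
      | none => best) none
  match best with
  | some b => b.1
  | none => "(None)"

-- ===== PRECONDITION & SPEC =====
-- a time field parses: split on ':' gives at least two pieces and every piece is int()-parsable
def pvTimeOk (p : List Char) : Prop :=
  2 ≤ (PySem.Chars.splitOn p [':']).length ∧
  ∀ piece ∈ PySem.Chars.splitOn p [':'], (PySem.Int.ofChars? piece).isSome

-- exactly the inputs where Python A returns normally: each entry has exactly 4 comma fields,
-- both time fields parse, and the melody key (4th field) is nonempty
def Pre_solution (m : String) (musicinfos : List String) : Prop :=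
  ∀ music ∈ musicinfos,
    (PySem.Chars.splitOn music.toList [',']).length = 4 ∧
    pvTimeOk (PySem.List.pyGetD (PySem.Chars.splitOn music.toList [',']) 0 []) ∧
    pvTimeOk (PySem.List.pyGetD (PySem.Chars.splitOn music.toList [',']) 1 []) ∧
    PySem.List.pyGetD (PySem.Chars.splitOn music.toList [',']) 3 [] ≠ []
instance (m : String) (musicinfos : List String) : Decidable (Pre_solution m musicinfos) := by
  unfold Pre_solution pvTimeOk; infer_instance

def pvWitness_solution : String × List String :=
  ("ABC", ["12:00,12:14,HELLO,C#ABC", "12:00,12:05,WORLD,ABCDEF"])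

def Spec_solution (m : String) (musicinfos : List String) (out : String) : Prop := out = solution_alt m musicinfos
instance (m : String) (musicinfos : List String) (out : String) : Decidable (Spec_solution m musicinfos out) := by unfold Spec_solution; infer_instance

-- ===== CLAIM (what is proved, stated in full; the proofs are below) =====
def Claim_equal_solution : Prop := ∀ (m : String) (musicinfos : List String), Dom_solution m musicinfos → Pre_solution m musicinfos → Spec_solution m musicinfos (solution m musicinfos)

-- ===== LEMMAS AND PROOFS =====

-- per-song agreement: A's loop body appends exactly what B's helper reports (for every music string)
theorem pvStep_eq (m : List Char) (answer : List (String × Int)) (music : String) :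
    pvStepA m answer music = answer ++ (pvMatched m music).toList := by
  unfold pvStepA pvMatched
  cases hsp : PySem.Chars.splitOn music.toList [','] with
  | nil => simp
  | cons s t =>
    cases t with
    | nil => simp
    | cons e t => cases t with
      | nil => simp
      | cons title t => cases t with
        | nil => simp
        | cons k t => cases t with
          | cons _ _ => simp
          | nil =>
            dsimp only
            set k' := pvNorm k with hk
            set sp := (PySem.Chars.splitOn s [':']).map (fun p => (PySem.Int.ofChars? p).getD 0)
            set ep := (PySem.Chars.splitOn e [':']).map (fun p => (PySem.Int.ofChars? p).getD 0)
            have ht : (PySem.List.pyGetD ep 0 0 - PySem.List.pyGetD sp 0 0) * 60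
                          + (PySem.List.pyGetD ep 1 0 - PySem.List.pyGetD sp 1 0)
                    = (PySem.List.pyGetD ep 0 0 * 60 + PySem.List.pyGetD ep 1 0)
                          - (PySem.List.pyGetD sp 0 0 * 60 + PySem.List.pyGetD sp 1 0) := by ring
            rw [ht]
            set time := (PySem.List.pyGetD ep 0 0 * 60 + PySem.List.pyGetD ep 1 0)
                          - (PySem.List.pyGetD sp 0 0 * 60 + PySem.List.pyGetD sp 1 0)
            -- the two expansions coincide (divmod = (//, %); for an empty key both are [])
            have htot : PySem.List.pyRepeat k' (PySem.Int.floordiv time (k'.length : Int))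
                           ++ PySem.List.slice k' none (some (PySem.Int.mod time (k'.length : Int)))
                = PySem.List.pyRepeat k' ((PySem.Int.divmod? time (k'.length : Int)).getD (0, 0)).1
                           ++ PySem.List.slice k' none (some ((PySem.Int.divmod? time (k'.length : Int)).getD (0, 0)).2) := by
              cases hk0 : k' with
              | nil => simp [PySem.List.pyRepeat, PySem.List.slice]
              | cons c cs =>
                have hne : ((cs.length : Int) + 1) ≠ 0 := by omega
                simp [PySem.Int.divmod?, hne, PySem.Int.floordiv, PySem.Int.mod]
            rw [← htot]
            -- 'm in total'  ↔  'total.find(m) != -1'  (both characterise the infix relation)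
            by_cases hin : m <:+: (PySem.List.pyRepeat k' (PySem.Int.floordiv time (k'.length : Int))
                           ++ PySem.List.slice k' none (some (PySem.Int.mod time (k'.length : Int))))
            · rw [if_pos ((PySem.Chars.isIn_iff_infix _ _).mpr hin),
                  if_pos ((PySem.Chars.find_ne_neg_one_iff _ _).mpr hin)]
              rfl
            · rw [if_neg (by simp [PySem.Chars.isIn_iff_infix, hin]),
                  if_neg (by simp [PySem.Chars.find_ne_neg_one_iff, hin])]
              simp

-- A's loop collects the per-song results in order
theorem pvFoldA_eq (m : List Char) (ms : List String) (acc : List (String × Int)) :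
    ms.foldl (pvStepA m) acc = acc ++ ms.filterMap (pvMatched m) := by
  induction ms generalizing acc with
  | nil => simp
  | cons x xs ih =>
    simp only [List.foldl_cons, List.filterMap_cons]
    rw [ih, pvStep_eq]
    cases pvMatched m x <;> simp

-- B's loop is the running-best fold over the per-song results
theorem pvFoldB_eq (m : List Char) (ms : List String) (acc : Option (String × Int)) :
    ms.foldl (fun best music =>
      match pvMatched m music with
      | some r => match best with
                  | none => some r
                  | some b => if r.2 > b.2 then some r else some b
      | none => best) acc
    = (ms.filterMap (pvMatched m)).foldl (fun best r =>
        match best with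
        | none => some r
        | some b => if r.2 > b.2 then some r else some b) acc := by
  induction ms generalizing acc with
  | nil => simp
  | cons x xs ih =>
    simp only [List.foldl_cons, List.filterMap_cons]
    cases pvMatched m x <;> simp [ih]

-- the head of the stable insertion sort by -time is the strict-> running maximum
theorem pvHead_insert (zs : List (String × Int)) (acc : List (String × Int)) :
    (zs.foldl (fun acc x => PySem.List.insertBy (fun a b => decide ((-a.2 : Int) < -b.2)) x acc) acc).head?
    = zs.foldl (fun best r =>
        match best with
        | none => some r
        | some b => if r.2 > b.2 then some r else some b) acc.head? := by
  induction zs generalizing acc with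
  | nil => rfl
  | cons x xs ih =>
    simp only [List.foldl_cons]
    rw [ih]
    congr 1
    cases acc with
    | nil => rfl
    | cons y ys =>
      simp only [PySem.List.insertBy]
      by_cases h : (-x.2 : Int) < -y.2
      · rw [if_pos (by simpa using h)]
        simp only [List.head?_cons]
        rw [if_pos (by omega)]
      · rw [if_neg (by simpa using h)]
        simp only [List.head?_cons]
        rw [if_neg (by omega)]

-- final selection agreement on any list of matches
theorem pvSelect_eq (zs : List (String × Int)) :
    (if zs.length = 0 then "(None)"
     else (PySem.List.pyGetD (PySem.List.sorted zs (fun x => -x.2) false) 0 ("", 0)).1)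
    = (match zs.foldl (fun best r =>
          match best with
          | none => some r
          | some b => if r.2 > b.2 then some r else some b) none with
       | some b => b.1
       | none => "(None)") := by
  by_cases hz : zs = []
  · subst hz; rfl
  · rw [if_neg (by simp [hz])]
    have hh := pvHead_insert zs []
    rw [← PySem.List.sorted_eq_foldl_insertBy] at hh
    simp only [List.head?_nil] at hh
    cases hsrt : PySem.List.sorted zs (fun x : String × Int => -x.2) false with
    | nil => exact absurd ((PySem.List.sorted_eq_nil_iff zs _ false).mp hsrt) hz
    | cons a t' =>
      have ha : zs.foldl (fun best r =>
          match best with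
          | none => some r
          | some b => if r.2 > b.2 then some r else some b) none = some a := by
        rw [← hh, hsrt]; rfl
      rw [ha]
      simp [PySem.List.pyGetD]

-- ===== VERDICT (by name: the statement is the Claim_ definition above) =====
theorem solution_spec : Claim_equal_solution := by
  intro m musicinfos _ _
  unfold Spec_solution solution solution_alt
  dsimp only
  rw [pvFoldA_eq, pvFoldB_eq]
  exact pvSelect_eq _
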